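-- pv_equiv track=rewrite | github.com/CDDLeiden/PyVADesign | src/eblocks.py | _find_values_to_adjust
-- ===== SOURCE A (Python) =====
-- def _find_values_to_adjust(invalid_constraints):
--     """Find values to be adjusted based on invalid constraints."""
--     values_to_adjust = {}
--     for key1, list1 in invalid_constraints.items():
--         for key2, list2 in invalid_constraints.items():
--             if key1 != key2:
--                 abs_list1 = [abs(i) for i in list1]
--                 abs_list2 = [abs(i) for i in list2]
--                 matches = [i for i in abs_list1 if i in abs_list2]
--                 if matches:
--                     highest = max(matches)
--                     # Track key where the highest value was found
--                     if highest in list1: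
--                         values_to_adjust[key1, key2] = [highest, key1]
--                     else:
--                         values_to_adjust[key1, key2] = [highest, key2]
--     return values_to_adjust
-- ===== SOURCE B (Python) =====
-- def _find_values_to_adjust(invalid_constraints):
--     """Find values to be adjusted based on invalid constraints."""
--     # Inverted index: abs value -> set of keys whose list contains it (by abs).
--     index = {}
--     for key, lst in invalid_constraints.items():
--         for v in lst:
--             index.setdefault(abs(v), set()).add(key)
--     # For each ordered pair of distinct keys, running maximum of shared abs values.
--     pair_max = {}
--     for v, ks in index.items():
--         if len(ks) > 1:
--             for k1 in ks:
--                 for k2 in ks: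
--                     if k1 != k2:
--                         cur = pair_max.get((k1, k2))
--                         if cur is None or v > cur:
--                             pair_max[(k1, k2)] = v
--     # Emit overlapping pairs in key order, labelling by literal membership of the max.
--     values_to_adjust = {}
--     keys = list(invalid_constraints)
--     for k1 in keys:
--         for k2 in keys:
--             if (k1, k2) in pair_max:
--                 h = pair_max[(k1, k2)]
--                 label = k1 if h in invalid_constraints[k1] else k2
--                 values_to_adjust[(k1, k2)] = [h, label]
--     return values_to_adjust
-- ===== Notes on version B (the rewrite author's own statement) =====
-- stated objective: alternative
-- what changed: A rescans and intersects the two abs-value lists for every ordered key pair; B builds a one-pass inverted index from each absolute value to the set of keys containing it, accumulates a per-pair running maximum of shared values over that index, and then emits the overlapping pairs in key order with O(1) lookups.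
import Mathlib
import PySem

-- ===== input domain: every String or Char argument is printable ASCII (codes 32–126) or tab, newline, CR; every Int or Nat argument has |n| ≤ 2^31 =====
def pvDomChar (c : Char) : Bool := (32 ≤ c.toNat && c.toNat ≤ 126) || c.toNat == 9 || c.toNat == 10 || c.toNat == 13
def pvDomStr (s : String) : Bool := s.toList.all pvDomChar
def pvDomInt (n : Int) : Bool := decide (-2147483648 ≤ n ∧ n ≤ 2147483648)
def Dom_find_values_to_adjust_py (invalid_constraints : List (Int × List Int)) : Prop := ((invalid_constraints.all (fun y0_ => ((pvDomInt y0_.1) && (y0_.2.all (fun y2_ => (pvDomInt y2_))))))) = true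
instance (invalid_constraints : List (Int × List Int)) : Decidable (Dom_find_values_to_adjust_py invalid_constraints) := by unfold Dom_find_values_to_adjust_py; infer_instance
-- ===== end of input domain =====

-- B replaces A's all-pairs list-intersection scan by a one-pass inverted index
-- (abs value → set of keys) plus a per-pair running maximum; objective: alternative.

-- ===== PORT A =====
def find_values_to_adjust_py (invalid_constraints : List (Int × List Int)) : List (Int × Int × List Int) :=
  (invalid_constraints.foldl (fun acc p1 =>
    invalid_constraints.foldl (fun acc p2 =>
      if p1.1 ≠ p2.1 then
        let abs_list1 := p1.2.map (fun i => |i|)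
        let abs_list2 := p2.2.map (fun i => |i|)
        let ms := abs_list1.filter (fun i => abs_list2.contains i)
        match PySem.List.max? ms (fun x => x) with
        | some highest =>
          if p1.2.contains highest then acc.insert (p1.1, p2.1) [highest, p1.1]
          else acc.insert (p1.1, p2.1) [highest, p2.1]
        | none => acc
      else acc) acc)
    (PySem.Dict.empty : PySem.Dict (Int × Int) (List Int))).items.map
      (fun q => (q.1.1, q.1.2, q.2))

-- ===== PORT B =====
-- index.setdefault(abs(v), set()).add(key) for every key and every v in its list
def pvAbsIndex (invalid_constraints : List (Int × List Int)) : PySem.Dict Int (PySem.Set Int) :=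
  invalid_constraints.foldl (fun idx p =>
    p.2.foldl (fun idx v =>
      idx.insert |v| (PySem.Set.add (idx.getD |v| PySem.Set.empty) p.1)) idx)
    PySem.Dict.empty

-- per ordered pair of distinct keys sharing a value, running maximum of the shared abs values
def pvPairMax (idx : PySem.Dict Int (PySem.Set Int)) : PySem.Dict (Int × Int) Int :=
  idx.items.foldl (fun pm q =>
    if 1 < PySem.Set.len q.2 then
      q.2.foldl (fun pm k1 =>
        q.2.foldl (fun pm k2 =>
          if k1 ≠ k2 then
            match pm.get? (k1, k2) with
            | none => pm.insert (k1, k2) q.1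
            | some cur => if cur < q.1 then pm.insert (k1, k2) q.1 else pm
          else pm) pm) pm
    else pm) PySem.Dict.empty

def find_values_to_adjust_py_alt (invalid_constraints : List (Int × List Int)) : List (Int × Int × List Int) :=
  let pm := pvPairMax (pvAbsIndex invalid_constraints)
  let keys := invalid_constraints.map Prod.fst
  ((keys.foldl (fun out k1 =>
    keys.foldl (fun out k2 =>
      match pm.get? (k1, k2) with
      | some h =>
        let l1 := (PySem.Dict.mk invalid_constraints).getD k1 []
        out.insert (k1, k2) (if l1.contains h then [h, k1] else [h, k2])
      | none => out) out)
    (PySem.Dict.empty : PySem.Dict (Int × Int) (List Int))).items).map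
      (fun q => (q.1.1, q.1.2, q.2))

-- ===== PRECONDITION & SPEC =====
-- Pre_ only encodes dict well-formedness (unique keys): the Python argument is a dict, so every
-- actual input satisfies it; an association list with duplicate keys does not represent a dict.
def Pre_find_values_to_adjust_py (invalid_constraints : List (Int × List Int)) : Prop :=
  (invalid_constraints.map Prod.fst).Nodup
instance (invalid_constraints : List (Int × List Int)) : Decidable (Pre_find_values_to_adjust_py invalid_constraints) := by unfold Pre_find_values_to_adjust_py; infer_instance
def pvWitness_find_values_to_adjust_py : (List (Int × List Int)) := [(1, [2, -3]), (2, [3])]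

def Spec_find_values_to_adjust_py (invalid_constraints : List (Int × List Int)) (out : List (Int × Int × List Int)) : Prop := out = find_values_to_adjust_py_alt invalid_constraints
instance (invalid_constraints : List (Int × List Int)) (out : List (Int × Int × List Int)) : Decidable (Spec_find_values_to_adjust_py invalid_constraints out) := by unfold Spec_find_values_to_adjust_py; infer_instance

-- ===== CLAIM (what is proved, stated in full; the proofs are below) =====
def Claim_equal_find_values_to_adjust_py : Prop := ∀ (invalid_constraints : List (Int × List Int)), Dom_find_values_to_adjust_py invalid_constraints → Pre_find_values_to_adjust_py invalid_constraints → Spec_find_values_to_adjust_py invalid_constraints (find_values_to_adjust_py invalid_constraints)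

-- ===== LEMMAS AND PROOFS =====

theorem pvIdxInner (key : Int) (l : List Int) (d : PySem.Dict Int (PySem.Set Int)) (k v : Int) :
    k ∈ (l.foldl (fun d x => d.insert |x| (PySem.Set.add (d.getD |x| PySem.Set.empty) key)) d).getD v PySem.Set.empty
    ↔ k ∈ d.getD v PySem.Set.empty ∨ (k = key ∧ ∃ x ∈ l, |x| = v) := by
  induction l generalizing d with
  | nil => simp
  | cons x t ih =>
    simp only [List.foldl_cons]
    rw [ih]
    by_cases hv : v = |x|
    · subst hv
      rw [PySem.Dict.getD_insert_self]
      simp only [PySem.Set.mem_add, List.mem_cons]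
      constructor
      · rintro ((h | h) | ⟨hk, y, hy, hvy⟩)
        · exact Or.inl h
        · exact Or.inr ⟨h, x, Or.inl rfl, rfl⟩
        · exact Or.inr ⟨hk, y, Or.inr hy, hvy⟩
      · rintro (h | ⟨hk, y, (rfl | hy), hvy⟩)
        · exact Or.inl (Or.inl h)
        · exact Or.inl (Or.inr hk)
        · exact Or.inr ⟨hk, y, hy, hvy⟩
    · rw [PySem.Dict.getD_insert_of_ne _ _ _ hv]
      constructor
      · rintro (h | ⟨hk, y, hy, hvy⟩)
        · exact Or.inl h
        · exact Or.inr ⟨hk, y, List.mem_cons_of_mem _ hy, hvy⟩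
      · rintro (h | ⟨hk, y, hy, hvy⟩)
        · exact Or.inl h
        · rcases List.mem_cons.1 hy with rfl | hy'
          · exact absurd hvy.symm hv
          · exact Or.inr ⟨hk, y, hy', hvy⟩

theorem pvIdxMem (ic : List (Int × List Int)) (k v : Int) :
    k ∈ (pvAbsIndex ic).getD v PySem.Set.empty ↔ ∃ p ∈ ic, p.1 = k ∧ ∃ x ∈ p.2, |x| = v := by
  have main : ∀ (l : List (Int × List Int)) (d : PySem.Dict Int (PySem.Set Int)),
      k ∈ (l.foldl (fun idx p => p.2.foldl (fun idx v =>
          idx.insert |v| (PySem.Set.add (idx.getD |v| PySem.Set.empty) p.1)) idx) d).getD v PySem.Set.empty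
      ↔ k ∈ d.getD v PySem.Set.empty ∨ ∃ p ∈ l, p.1 = k ∧ ∃ x ∈ p.2, |x| = v := by
    intro l
    induction l with
    | nil => simp
    | cons p t ih =>
      intro d
      simp only [List.foldl_cons]
      rw [ih, pvIdxInner]
      constructor
      · rintro ((h | ⟨rfl, hx⟩) | ⟨q, hq, hqk, hx⟩)
        · exact Or.inl h
        · exact Or.inr ⟨p, List.mem_cons_self .., rfl, hx⟩
        · exact Or.inr ⟨q, List.mem_cons_of_mem _ hq, hqk, hx⟩
      · rintro (h | ⟨q, hq, hqk, hx⟩)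
        · exact Or.inl (Or.inl h)
        · rcases List.mem_cons.1 hq with rfl | hq'
          · exact Or.inl (Or.inr ⟨hqk.symm, hx⟩)
          · exact Or.inr ⟨q, hq', hqk, hx⟩
  rw [pvAbsIndex, main]
  simp

theorem pvIdxNodup (ic : List (Int × List Int)) : (pvAbsIndex ic).keys.Nodup := by
  have main : ∀ (l : List (Int × List Int)) (d : PySem.Dict Int (PySem.Set Int)), d.keys.Nodup →
      (l.foldl (fun idx p => p.2.foldl (fun idx v =>
          idx.insert |v| (PySem.Set.add (idx.getD |v| PySem.Set.empty) p.1)) idx) d).keys.Nodup := by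
    intro l
    induction l with
    | nil => intro d hd; simpa using hd
    | cons p t ih =>
      intro d hd
      simp only [List.foldl_cons]
      exact ih _ (PySem.Dict.nodup_keys_foldl_insert_key p.2 (fun x => |x|)
        (fun d x => PySem.Set.add (d.getD |x| PySem.Set.empty) p.1) d hd)
  exact main ic _ PySem.Dict.nodup_keys_empty

def pvOmax : Option Int → Int → Int
  | none, v => v
  | some c, v => max c v

theorem pvOmax_idem (o : Option Int) (v : Int) : pvOmax (some (pvOmax o v)) v = pvOmax o v := by
  cases o <;> simp [pvOmax]

theorem pvPMInner (v k1 : Int) (ks2 : List Int) (pm : PySem.Dict (Int × Int) Int) (a b : Int) :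
    (ks2.foldl (fun pm k2 =>
        if k1 ≠ k2 then
          match pm.get? (k1, k2) with
          | none => pm.insert (k1, k2) v
          | some cur => if cur < v then pm.insert (k1, k2) v else pm
        else pm) pm).get? (a, b)
    = if a = k1 ∧ b ∈ ks2 ∧ a ≠ b then some (pvOmax (pm.get? (a, b)) v) else pm.get? (a, b) := by
  induction ks2 generalizing pm with
  | nil => simp
  | cons k2 t ih =>
    simp only [List.foldl_cons]
    rw [ih]
    have hstep : ∀ x y : Int,
        ((if k1 ≠ k2 then
          match pm.get? (k1, k2) with
          | none => pm.insert (k1, k2) v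
          | some cur => if cur < v then pm.insert (k1, k2) v else pm
        else pm).get? (x, y))
        = if x = k1 ∧ y = k2 ∧ k1 ≠ k2 then some (pvOmax (pm.get? (k1, k2)) v)
          else pm.get? (x, y) := by
      intro x y
      by_cases h12 : k1 = k2
      · simp [h12]
      · rw [if_pos h12]
        cases hg : pm.get? (k1, k2) with
        | none =>
          rw [PySem.Dict.get?_insert]
          by_cases hxy : x = k1 ∧ y = k2
          · obtain ⟨rfl, rfl⟩ := hxy
            simp [h12, pvOmax]
          · rw [if_neg (by simp [Prod.ext_iff]; intro hx hy; exact hxy ⟨hx, hy⟩),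
               if_neg (by intro h; exact hxy ⟨h.1, h.2.1⟩)]
        | some cur =>
          dsimp only
          by_cases hlt : cur < v
          · rw [if_pos hlt, PySem.Dict.get?_insert]
            by_cases hxy : x = k1 ∧ y = k2
            · obtain ⟨rfl, rfl⟩ := hxy
              simp [h12, pvOmax, max_eq_right (le_of_lt hlt)]
            · rw [if_neg (by simp [Prod.ext_iff]; intro hx hy; exact hxy ⟨hx, hy⟩),
                 if_neg (by intro h; exact hxy ⟨h.1, h.2.1⟩)]
          · rw [if_neg hlt]
            by_cases hxy : x = k1 ∧ y = k2
            · obtain ⟨rfl, rfl⟩ := hxy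
              rw [if_pos ⟨rfl, rfl, h12⟩, hg]
              simp [pvOmax, max_eq_left (le_of_not_gt hlt)]
            · rw [if_neg (by intro h; exact hxy ⟨h.1, h.2.1⟩)]
    rw [hstep a b]
    by_cases ha : a = k1 <;> by_cases hab : a = b <;> by_cases hbk : b = k2 <;> by_cases hbt : b ∈ t <;>
      simp_all [pvOmax_idem, List.mem_cons]

theorem pvPMOuter (v : Int) (ks1 ks : List Int) (pm : PySem.Dict (Int × Int) Int) (a b : Int) :
    (ks1.foldl (fun pm k1 =>
      ks.foldl (fun pm k2 =>
        if k1 ≠ k2 then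
          match pm.get? (k1, k2) with
          | none => pm.insert (k1, k2) v
          | some cur => if cur < v then pm.insert (k1, k2) v else pm
        else pm) pm) pm).get? (a, b)
    = if a ∈ ks1 ∧ b ∈ ks ∧ a ≠ b then some (pvOmax (pm.get? (a, b)) v) else pm.get? (a, b) := by
  induction ks1 generalizing pm with
  | nil => simp
  | cons k1 t ih =>
    simp only [List.foldl_cons]
    rw [ih]
    rw [pvPMInner]
    by_cases ha : a = k1 <;> by_cases hab : a = b <;> by_cases hat : a ∈ t <;> by_cases hb : b ∈ ks <;>
      simp_all [pvOmax_idem, List.mem_cons]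

theorem pvPMFold (L : List (Int × PySem.Set Int)) (pm : PySem.Dict (Int × Int) Int) (a b : Int) :
    (L.foldl (fun pm q =>
      if 1 < PySem.Set.len q.2 then
        q.2.foldl (fun pm k1 =>
          q.2.foldl (fun pm k2 =>
            if k1 ≠ k2 then
              match pm.get? (k1, k2) with
              | none => pm.insert (k1, k2) q.1
              | some cur => if cur < q.1 then pm.insert (k1, k2) q.1 else pm
            else pm) pm) pm
      else pm) pm).get? (a, b)
    = L.foldl (fun o q => if a ∈ q.2 ∧ b ∈ q.2 ∧ a ≠ b then some (pvOmax o q.1) else o) (pm.get? (a, b)) := by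
  induction L generalizing pm with
  | nil => simp
  | cons q t ih =>
    simp only [List.foldl_cons]
    by_cases hlen : 1 < PySem.Set.len q.2
    · rw [if_pos hlen, ih, pvPMOuter]
    · rw [if_neg hlen, ih]
      have hsmall : ¬ (a ∈ q.2 ∧ b ∈ q.2 ∧ a ≠ b) := by
        rintro ⟨ha, hb, hab⟩
        have : (q.2 : List Int).length ≤ 1 := by
          simp only [PySem.Set.len] at hlen
          omega
        match hq : (q.2 : List Int), this with
        | [], _ => rw [hq] at ha; simp at ha
        | [x], _ =>
          rw [hq] at ha hb
          simp at ha hb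
          exact hab (ha.trans hb.symm)
      rw [if_neg hsmall]

def pvBest (a b : Int) (L : List (Int × PySem.Set Int)) (o : Option Int) : Option Int :=
  L.foldl (fun o q => if a ∈ q.2 ∧ b ∈ q.2 ∧ a ≠ b then some (pvOmax o q.1) else o) o

theorem pvPairMax_get (idx : PySem.Dict Int (PySem.Set Int)) (a b : Int) :
    (pvPairMax idx).get? (a, b) = pvBest a b idx.items none := by
  unfold pvPairMax pvBest
  rw [pvPMFold]
  rw [PySem.Dict.get?_empty]

theorem pvBest_some_acc (a b : Int) (L : List (Int × PySem.Set Int)) (o : Option Int)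
    (ho : o.isSome) : (pvBest a b L o).isSome := by
  induction L generalizing o with
  | nil => simpa [pvBest] using ho
  | cons q t ih =>
    simp only [pvBest, List.foldl_cons]
    by_cases hc : a ∈ q.2 ∧ b ∈ q.2 ∧ a ≠ b
    · rw [if_pos hc]; exact ih _ (by simp)
    · rw [if_neg hc]; exact ih _ ho

theorem pvBest_none_spec (a b : Int) (L : List (Int × PySem.Set Int)) (o : Option Int)
    (h : pvBest a b L o = none) : o = none ∧ ∀ q ∈ L, ¬ (a ∈ q.2 ∧ b ∈ q.2 ∧ a ≠ b) := by
  induction L generalizing o with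
  | nil => exact ⟨h, by simp⟩
  | cons q t ih =>
    simp only [pvBest, List.foldl_cons] at h
    by_cases hc : a ∈ q.2 ∧ b ∈ q.2 ∧ a ≠ b
    · rw [if_pos hc] at h
      have := pvBest_some_acc a b t (some (pvOmax o q.1)) (by simp)
      rw [show pvBest a b t (some (pvOmax o q.1)) = List.foldl _ _ t from rfl] at this
      rw [h] at this
      simp at this
    · rw [if_neg hc] at h
      obtain ⟨ho, hall⟩ := ih _ h
      refine ⟨ho, ?_⟩
      intro r hr
      rcases List.mem_cons.1 hr with rfl | hr'
      · exact hc
      · exact hall r hr'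

theorem pvBest_some_spec (a b : Int) (L : List (Int × PySem.Set Int)) (o : Option Int) (m : Int)
    (h : pvBest a b L o = some m) :
    (o = some m ∨ ∃ q ∈ L, (a ∈ q.2 ∧ b ∈ q.2 ∧ a ≠ b) ∧ q.1 = m) ∧
    (∀ q ∈ L, (a ∈ q.2 ∧ b ∈ q.2 ∧ a ≠ b) → q.1 ≤ m) ∧
    (∀ c, o = some c → c ≤ m) := by
  induction L generalizing o with
  | nil =>
    simp only [pvBest, List.foldl_nil] at h
    exact ⟨Or.inl h, by simp, fun c hc => by rw [hc] at h; simp at h; omega⟩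
  | cons q t ih =>
    simp only [pvBest, List.foldl_cons] at h
    by_cases hc : a ∈ q.2 ∧ b ∈ q.2 ∧ a ≠ b
    · rw [if_pos hc] at h
      obtain ⟨horig, hub, hmono⟩ := ih _ h
      have hq1le : q.1 ≤ m := by
        refine hmono (pvOmax o q.1) rfl |>.trans' ?_
        cases o <;> simp [pvOmax]
      constructor
      · rcases horig with he | ⟨r, hr, hrc, hrm⟩
        · -- some (pvOmax o q.1) = some m
          cases o with
          | none => exact Or.inr ⟨q, List.mem_cons_self .., hc, by simpa [pvOmax] using he⟩
          | some c =>
            simp only [pvOmax, Option.some.injEq] at he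
            rcases max_choice c q.1 with hm | hm
            · exact Or.inl (by rw [← he, hm])
            · exact Or.inr ⟨q, List.mem_cons_self .., hc, by rw [← he, hm]⟩
        · exact Or.inr ⟨r, List.mem_cons_of_mem _ hr, hrc, hrm⟩
      refine ⟨?_, ?_⟩
      · intro r hr hrc
        rcases List.mem_cons.1 hr with rfl | hr'
        · exact hq1le
        · exact hub r hr' hrc
      · intro c hco
        refine (hmono (pvOmax o q.1) rfl).trans' ?_
        rw [hco]; simp [pvOmax]
    · rw [if_neg hc] at h
      obtain ⟨horig, hub, hmono⟩ := ih _ h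
      refine ⟨horig.imp id (fun ⟨r, hr, hrc, hrm⟩ => ⟨r, List.mem_cons_of_mem _ hr, hrc, hrm⟩), ?_, hmono⟩
      intro r hr hrc
      rcases List.mem_cons.1 hr with rfl | hr'
      · exact absurd hrc hc
      · exact hub r hr' hrc

theorem pvBest_diag (a : Int) (L : List (Int × PySem.Set Int)) (o : Option Int) :
    pvBest a a L o = o := by
  induction L generalizing o with
  | nil => rfl
  | cons q t ih =>
    simp only [pvBest, List.foldl_cons] at ih ⊢
    rw [if_neg (by rintro ⟨-, -, h⟩; exact h rfl)]
    exact ih o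

theorem pvAssocEq (ic : List (Int × List Int)) (hnd : (ic.map Prod.fst).Nodup)
    {p : Int × List Int} (hp : p ∈ ic) : (PySem.Dict.mk ic).getD p.1 [] = p.2 := by
  refine PySem.Dict.getD_of_mem_items _ ?_ ?_ []
  · simpa using hp
  · simpa [PySem.Dict.keys] using hnd

theorem pvAssocUnique (ic : List (Int × List Int)) (hnd : (ic.map Prod.fst).Nodup)
    {a : Int} {l l' : List Int} (h1 : (a, l) ∈ ic) (h2 : (a, l') ∈ ic) : l = l' := by
  have e1 := pvAssocEq ic hnd h1
  have e2 := pvAssocEq ic hnd h2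
  simp only at e1 e2
  rw [← e1, ← e2]

theorem pvQualIff (ic : List (Int × List Int)) (hnd : (ic.map Prod.fst).Nodup)
    {a b : Int} {l1 l2 : List Int} (h1 : (a, l1) ∈ ic) (h2 : (b, l2) ∈ ic) (v : Int) :
    (∃ ks, (v, ks) ∈ (pvAbsIndex ic).items ∧ a ∈ ks ∧ b ∈ ks)
    ↔ ((∃ x ∈ l1, |x| = v) ∧ (∃ x ∈ l2, |x| = v)) := by
  constructor
  · rintro ⟨ks, hks, hak, hbk⟩
    have hget := PySem.Dict.get?_of_mem_items _ hks (pvIdxNodup ic)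
    have hgd : (pvAbsIndex ic).getD v PySem.Set.empty = ks :=
      PySem.Dict.getD_of_get?_eq_some _ _ hget
    rw [← hgd] at hak hbk
    obtain ⟨p, hp, hpa, x, hx, hxv⟩ := (pvIdxMem ic a v).1 hak
    obtain ⟨q, hq, hqb, y, hy, hyv⟩ := (pvIdxMem ic b v).1 hbk
    have hpl : p.2 = l1 := by
      apply pvAssocUnique ic hnd _ h1
      rw [← hpa]; simpa using hp
    have hql : q.2 = l2 := by
      apply pvAssocUnique ic hnd _ h2
      rw [← hqb]; simpa using hq
    exact ⟨⟨x, hpl ▸ hx, hxv⟩, ⟨y, hql ▸ hy, hyv⟩⟩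
  · rintro ⟨⟨x, hx, hxv⟩, ⟨y, hy, hyv⟩⟩
    have hak : a ∈ (pvAbsIndex ic).getD v PySem.Set.empty :=
      (pvIdxMem ic a v).2 ⟨(a, l1), h1, rfl, x, hx, hxv⟩
    have hbk : b ∈ (pvAbsIndex ic).getD v PySem.Set.empty :=
      (pvIdxMem ic b v).2 ⟨(b, l2), h2, rfl, y, hy, hyv⟩
    have hcont : (pvAbsIndex ic).contains v = true := by
      by_contra hnc
      rw [PySem.Dict.getD_of_not_contains _ _ (by simpa using hnc)] at hak
      simp [PySem.Set.empty] at hak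
    rw [PySem.Dict.contains_eq_isSome_get?] at hcont
    obtain ⟨ks, hget⟩ := Option.isSome_iff_exists.1 hcont
    have hgd := PySem.Dict.getD_of_get?_eq_some (pvAbsIndex ic) (PySem.Set.empty) hget
    rw [hgd] at hak hbk
    exact ⟨ks, PySem.Dict.mem_items_of_get?_eq_some _ hget, hak, hbk⟩

theorem pvPairMax_diag (idx : PySem.Dict Int (PySem.Set Int)) (a : Int) :
    (pvPairMax idx).get? (a, a) = none := by
  rw [pvPairMax_get, pvBest_diag]

theorem pvMatchesMem (l1 l2 : List Int) (v : Int) :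
    v ∈ (l1.map (fun i => |i|)).filter (fun i => (l2.map (fun i => |i|)).contains i)
    ↔ ((∃ x ∈ l1, |x| = v) ∧ (∃ x ∈ l2, |x| = v)) := by
  simp only [List.mem_filter, List.mem_map, List.contains_iff_mem]

theorem pvPairMaxEq (ic : List (Int × List Int)) (hnd : (ic.map Prod.fst).Nodup)
    {a b : Int} {l1 l2 : List Int} (h1 : (a, l1) ∈ ic) (h2 : (b, l2) ∈ ic) (hab : a ≠ b) :
    (pvPairMax (pvAbsIndex ic)).get? (a, b)
    = PySem.List.max? ((l1.map (fun i => |i|)).filter (fun i => (l2.map (fun i => |i|)).contains i))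
        (fun x => x) := by
  rw [pvPairMax_get]
  set ms := (l1.map (fun i => |i|)).filter (fun i => (l2.map (fun i => |i|)).contains i) with hms
  cases hM : PySem.List.max? ms (fun x => x) with
  | none =>
    have hempty : ms = [] := (PySem.List.max?_eq_none_iff ms _).1 hM
    cases hB : pvBest a b (pvAbsIndex ic).items none with
    | none => rfl
    | some m =>
      obtain ⟨horig, -, -⟩ := pvBest_some_spec a b _ none m hB
      rcases horig with h | ⟨q, hq, ⟨haq, hbq, -⟩, hqm⟩
      · simp at h
      · have : m ∈ ms := (pvMatchesMem l1 l2 m).2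
          (((pvQualIff ic hnd h1 h2 q.1).1 ⟨q.2, by simpa using hq, haq, hbq⟩).imp id id |> (hqm ▸ ·))
        rw [hempty] at this
        simp at this
  | some m1 =>
    have hm1 : m1 ∈ ms := PySem.List.max?_mem hM
    have hub1 : ∀ y ∈ ms, y ≤ m1 := PySem.List.max?_isMax hM
    obtain ⟨ks, hks, hak, hbk⟩ := (pvQualIff ic hnd h1 h2 m1).2 ((pvMatchesMem l1 l2 m1).1 hm1)
    cases hB : pvBest a b (pvAbsIndex ic).items none with
    | none =>
      have := (pvBest_none_spec a b _ none hB).2 (m1, ks) hks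
      exact absurd ⟨hak, hbk, hab⟩ this
    | some m2 =>
      obtain ⟨horig, hub2, -⟩ := pvBest_some_spec a b _ none m2 hB
      have hm2ms : m2 ∈ ms := by
        rcases horig with h | ⟨q, hq, ⟨haq, hbq, -⟩, hqm⟩
        · simp at h
        · exact (pvMatchesMem l1 l2 m2).2
            (hqm ▸ (pvQualIff ic hnd h1 h2 q.1).1 ⟨q.2, by simpa using hq, haq, hbq⟩)
      have hle : m2 ≤ m1 := hub1 m2 hm2ms
      have hge : m1 ≤ m2 := hub2 (m1, ks) hks ⟨hak, hbk, hab⟩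
      rw [le_antisymm hle hge]

theorem pvMain (ic : List (Int × List Int)) (hnd : (ic.map Prod.fst).Nodup) :
    find_values_to_adjust_py ic = find_values_to_adjust_py_alt ic := by
  unfold find_values_to_adjust_py find_values_to_adjust_py_alt
  dsimp only
  simp only [List.foldl_map]
  congr 2
  apply PySem.List.foldl_congr_mem
  intro acc p1 hp1
  apply PySem.List.foldl_congr_mem
  intro acc2 p2 hp2
  by_cases h12 : p1.1 = p2.1
  · rw [if_neg (by simpa using h12), h12, pvPairMax_diag]
  · have h1 : (p1.1, p1.2) ∈ ic := by simpa using hp1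
    have h2 : (p2.1, p2.2) ∈ ic := by simpa using hp2
    rw [if_pos h12, pvPairMaxEq ic hnd h1 h2 h12]
    cases hM : PySem.List.max?
        ((p1.2.map (fun i => |i|)).filter (fun i => (p2.2.map (fun i => |i|)).contains i))
        (fun x => x) with
    | none => rfl
    | some h =>
      rw [pvAssocEq ic hnd hp1]
      dsimp only
      split_ifs <;> rfl

-- ===== VERDICT (by name: the statement is the Claim_ definition above) =====
theorem find_values_to_adjust_py_spec : Claim_equal_find_values_to_adjust_py := by
  intro invalid_constraints _ hpre
  unfold Spec_find_values_to_adjust_py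
  exact pvMain invalid_constraints hpre
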